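-- pv_equiv track=rewrite | github.com/maximilian-salomon/mdxplain | mdxplain/feature_selection/helpers/common_denominator_helper.py | identity_present_in_list
-- ===== SOURCE A (Python) =====
-- from typing import List
--
-- def identity_present_in_list(target_identity: dict, identity_list: List[dict]) -> bool:
--     """
--     Check if target identity is present in identity list.
--
--     Parameters:
--     -----------
--     target_identity : dict
--         Identity to search for (with "partners" key containing all partner info)
--     identity_list : List[dict]
--         List of identities to search in
--
--     Returns:
--     --------
--     bool
--         True if identity is found (matches all partners' aaa_code, seqid, consensus)
--     """
--     target_partners = target_identity.get("partners", [])
--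
--     for identity in identity_list:
--         identity_partners = identity.get("partners", [])
--
--         # Check if all partners match
--         if len(target_partners) == len(identity_partners):
--             all_match = True
--             for t_partner, i_partner in zip(target_partners, identity_partners):
--                 if (t_partner.get("aaa_code") != i_partner.get("aaa_code") or
--                     t_partner.get("seqid") != i_partner.get("seqid") or
--                     # TODO: Not Sure if we want this. Consensus can be very specific. Maybe ignore it?
--                     t_partner.get("consensus") != i_partner.get("consensus")):
--                     all_match = False
--                     break
--             if all_match:
--                 return True
--
--     return False
-- ===== SOURCE B (Python) =====
-- def identity_present_in_list(target_identity: dict, identity_list) -> bool: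
--     """Index the list into a hash set of canonical partner-key tuples, then one membership test."""
--     def canon(identity):
--         return tuple((p.get("aaa_code"), p.get("seqid"), p.get("consensus"))
--                      for p in identity.get("partners", []))
--     index = {canon(identity) for identity in identity_list}
--     return canon(target_identity) in index
-- ===== Notes on version B (the rewrite author's own statement) =====
-- stated objective: alternative
-- what changed: Instead of scanning the list and comparing each candidate's partners field-by-field with a length guard, flag and break, B canonicalizes every identity to a hashable tuple of (aaa_code, seqid, consensus) keys, builds a set index over the whole list once, and answers with a single hash-set membership test (no per-candidate comparison loop, no early exit).
import Mathlib
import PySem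

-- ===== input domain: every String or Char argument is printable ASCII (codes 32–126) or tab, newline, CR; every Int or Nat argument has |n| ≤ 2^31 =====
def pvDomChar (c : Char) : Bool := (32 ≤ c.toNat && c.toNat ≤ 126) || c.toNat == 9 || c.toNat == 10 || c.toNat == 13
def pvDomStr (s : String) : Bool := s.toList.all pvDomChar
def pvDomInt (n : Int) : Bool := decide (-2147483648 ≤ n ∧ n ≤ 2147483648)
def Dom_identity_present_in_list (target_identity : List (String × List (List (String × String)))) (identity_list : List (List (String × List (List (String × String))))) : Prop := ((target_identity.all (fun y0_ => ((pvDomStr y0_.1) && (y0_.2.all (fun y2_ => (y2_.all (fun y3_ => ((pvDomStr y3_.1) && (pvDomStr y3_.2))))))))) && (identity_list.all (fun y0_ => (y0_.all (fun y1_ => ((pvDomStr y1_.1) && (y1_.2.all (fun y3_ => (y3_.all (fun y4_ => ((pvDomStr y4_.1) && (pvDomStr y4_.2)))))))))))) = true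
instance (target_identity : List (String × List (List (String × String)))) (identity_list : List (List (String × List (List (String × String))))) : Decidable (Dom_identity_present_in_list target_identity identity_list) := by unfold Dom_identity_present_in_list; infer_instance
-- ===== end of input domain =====

-- B replaces A's scan-and-compare loop (length guard, field loop, flag, break) by building a
-- hash-set index of canonical (aaa_code, seqid, consensus) key tuples once and answering with
-- one set-membership test; objective: alternative (different data structure, same asymptotics).

-- dict.get on an association list: first match (Python dicts have unique keys)
def pvGet {α : Type} (d : List (String × α)) (k : String) : Option α :=
  (d.find? (fun kv => kv.1 == k)).map (·.2)

-- ===== PORT A =====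
-- inner 'for t_partner, i_partner in zip(...)' loop with all_match flag and break
def pvAllMatch : List (List (String × String) × List (String × String)) → Bool
  | [] => true
  | (t, i) :: rest =>
    if pvGet t "aaa_code" != pvGet i "aaa_code" || pvGet t "seqid" != pvGet i "seqid" ||
       pvGet t "consensus" != pvGet i "consensus" then false
    else pvAllMatch rest

-- outer 'for identity in identity_list' loop with early return True
def pvLoopA (tp : List (List (String × String))) :
    List (List (String × List (List (String × String)))) → Bool
  | [] => false
  | identity :: rest =>
    let ip := (pvGet identity "partners").getD []
    if tp.length == ip.length then
      (if pvAllMatch (tp.zip ip) then true else pvLoopA tp rest)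
    else pvLoopA tp rest

def identity_present_in_list (target_identity : List (String × List (List (String × String)))) (identity_list : List (List (String × List (List (String × String))))) : Bool :=
  pvLoopA ((pvGet target_identity "partners").getD []) identity_list

-- ===== PORT B =====
-- canon(identity): tuple of (aaa_code, seqid, consensus) per partner
def pvCanonP (p : List (String × String)) : Option String × Option String × Option String :=
  (pvGet p "aaa_code", pvGet p "seqid", pvGet p "consensus")

def pvCanon (identity : List (String × List (List (String × String)))) :
    List (Option String × Option String × Option String) :=
  ((pvGet identity "partners").getD []).map pvCanonP

def identity_present_in_list_alt (target_identity : List (String × List (List (String × String)))) (identity_list : List (List (String × List (List (String × String))))) : Bool :=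
  -- index = {canon(identity) for identity in identity_list}; return canon(target) in index
  let index := PySem.Set.ofList (identity_list.map pvCanon)
  PySem.Set.contains index (pvCanon target_identity)

-- ===== PRECONDITION & SPEC =====
def Spec_identity_present_in_list (target_identity : List (String × List (List (String × String)))) (identity_list : List (List (String × List (List (String × String))))) (out : Bool) : Prop := out = identity_present_in_list_alt target_identity identity_list
instance (target_identity : List (String × List (List (String × String)))) (identity_list : List (List (String × List (List (String × String))))) (out : Bool) : Decidable (Spec_identity_present_in_list target_identity identity_list out) := by unfold Spec_identity_present_in_list; infer_instance

-- ===== CLAIM (what is proved, stated in full; the proofs are below) =====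
def Claim_equal_identity_present_in_list : Prop := ∀ (target_identity : List (String × List (List (String × String)))) (identity_list : List (List (String × List (List (String × String))))), Dom_identity_present_in_list target_identity identity_list → Spec_identity_present_in_list target_identity identity_list (identity_present_in_list target_identity identity_list)

-- ===== LEMMAS AND PROOFS =====
-- one identity: length guard + inner loop over the zip = equality of canonical key lists
theorem allMatch_prop (tp ip : List (List (String × String))) :
    (tp.length = ip.length ∧ pvAllMatch (tp.zip ip) = true) ↔ ip.map pvCanonP = tp.map pvCanonP := by
  induction tp generalizing ip with
  | nil => cases ip <;> simp [pvAllMatch]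
  | cons t tr ih =>
    cases ip with
    | nil => simp [pvAllMatch]
    | cons i ir =>
      simp only [List.zip_cons_cons, List.map_cons, List.length_cons, pvAllMatch,
        List.cons.injEq, Nat.add_right_cancel_iff, ← ih ir]
      by_cases h1 : pvGet t "aaa_code" = pvGet i "aaa_code" <;>
      by_cases h2 : pvGet t "seqid" = pvGet i "seqid" <;>
      by_cases h3 : pvGet t "consensus" = pvGet i "consensus" <;>
        simp only [pvCanonP, h1, h2, h3, Prod.mk.injEq, bne_self_eq_false, Bool.or_self,
          Bool.or_false, Bool.false_or] <;>
        simp_all [bne_iff_ne] <;> tauto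

-- A's outer loop decides membership of the target key list among the canonical key lists
theorem loopA_eq_mem (tp : List (List (String × String)))
    (il : List (List (String × List (List (String × String))))) :
    pvLoopA tp il = decide (tp.map pvCanonP ∈ il.map pvCanon) := by
  induction il with
  | nil => simp [pvLoopA]
  | cons idn rest ih =>
    have hmatch : ((tp.length == ((pvGet idn "partners").getD []).length) &&
        pvAllMatch (tp.zip ((pvGet idn "partners").getD []))) =
        decide (pvCanon idn = tp.map pvCanonP) := by
      rw [Bool.eq_iff_iff]
      simp only [Bool.and_eq_true, beq_iff_eq, decide_eq_true_eq, pvCanon]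
      rw [← allMatch_prop]
    have key : ∀ (b c x : Bool), (if b then (if c then true else x) else x) = ((b && c) || x) := by
      decide
    simp only [pvLoopA]
    rw [key, hmatch, ih, Bool.eq_iff_iff]
    simp only [List.map_cons, List.mem_cons, Bool.or_eq_true, decide_eq_true_eq]
    exact or_congr eq_comm Iff.rfl

-- ===== VERDICT (by name: the statement is the Claim_ definition above) =====
theorem identity_present_in_list_spec : Claim_equal_identity_present_in_list := by
  intro ti il _
  show identity_present_in_list ti il = identity_present_in_list_alt ti il
  rw [identity_present_in_list, identity_present_in_list_alt, loopA_eq_mem]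
  rw [Bool.eq_iff_iff]
  simp [PySem.Set.mem_ofList, pvCanon]
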